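-- pv_equiv track=rewrite | github.com/m-kus/zk-benchmark | checkers/mm/common/metamath-files/mk_size_example.py | mm_encode
-- ===== SOURCE A (Python) =====
-- def mm_encode(num):
--     if num <= 0:
--         error('Num must be positive')
--     (upper,d) = divmod(num-1,20)
--     digits = [chr(d+ord('A'))]
--     while upper > 0:
--         (upper,d) = divmod(upper-1, 5)
--         digits.append(chr(d+ord('U')))
--     return ''.join(reversed(digits))
-- ===== SOURCE B (Python) =====
-- def _mm_upper(n):
--     # bijective base-5 over letters U..Y, most significant first
--     q, r = divmod(n - 1, 5)
--     return (_mm_upper(q) if q > 0 else '') + chr(r + ord('U'))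
--
-- def mm_encode(num):
--     if num <= 0:
--         raise ValueError('Num must be positive')
--     upper, d = divmod(num - 1, 20)
--     low = chr(d + ord('A'))
--     return (_mm_upper(upper) if upper > 0 else '') + low
-- ===== Notes on version B (the rewrite author's own statement) =====
-- stated objective: alternative
-- what changed: Replaced the append-then-reverse digit loop with a recursive bijective base conversion that emits the most significant letter first via direct string concatenation.
-- outside the precondition, e.g. on mm_encode(0): A raises NameError, B raises ValueError
import Mathlib
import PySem

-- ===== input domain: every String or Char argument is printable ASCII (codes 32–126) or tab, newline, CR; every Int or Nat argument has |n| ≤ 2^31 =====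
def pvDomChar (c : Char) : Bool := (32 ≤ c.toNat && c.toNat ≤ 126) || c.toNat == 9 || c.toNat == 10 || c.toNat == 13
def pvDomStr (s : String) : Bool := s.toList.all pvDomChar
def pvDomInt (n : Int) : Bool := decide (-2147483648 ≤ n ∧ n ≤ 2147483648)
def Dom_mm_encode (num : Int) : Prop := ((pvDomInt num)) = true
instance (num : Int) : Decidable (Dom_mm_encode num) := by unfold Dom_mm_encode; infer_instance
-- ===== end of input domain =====

-- B replaces A's append-then-reverse loop by a recursive bijective base conversion (alternative decomposition, same cost).

-- ===== PORT A =====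
-- the while loop: state = (upper, digits); appends U..Y letters
def mmLoopA (upper : Int) (digits : List Char) : List Char :=
  if h : 0 < upper then
    mmLoopA (PySem.Int.floordiv (upper - 1) 5)
      (digits ++ [Char.ofNat ((PySem.Int.mod (upper - 1) 5) + 85).toNat])
  else digits
termination_by upper.toNat
decreasing_by
  rw [PySem.Int.floordiv_eq_ediv_of_pos (by norm_num)]
  omega

def mm_encode (num : Int) : String :=
  if num ≤ 0 then ""  -- Python raises here (undefined error()); excluded by Pre_
  else
    let upper := PySem.Int.floordiv (num - 1) 20
    let d := PySem.Int.mod (num - 1) 20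
    String.mk (mmLoopA upper [Char.ofNat (d + 65).toNat]).reverse

-- ===== PORT B =====
-- _mm_upper: recursive bijective base-5 on letters U..Y, most significant first
def mmUpperB (n : Int) : List Char :=
  let q := PySem.Int.floordiv (n - 1) 5
  let r := PySem.Int.mod (n - 1) 5
  (if h : 0 < q then mmUpperB q else []) ++ [Char.ofNat (r + 85).toNat]
termination_by n.toNat
decreasing_by
  have h' : 0 < (n - 1) / 5 := by
    rw [← PySem.Int.floordiv_eq_ediv_of_pos (by norm_num : (0:Int) < 5)]; exact h
  rw [PySem.Int.floordiv_eq_ediv_of_pos (by norm_num)]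
  omega

def mm_encode_alt (num : Int) : String :=
  if num ≤ 0 then ""  -- Python raises ValueError here; excluded by Pre_
  else
    let upper := PySem.Int.floordiv (num - 1) 20
    let d := PySem.Int.mod (num - 1) 20
    String.mk ((if 0 < upper then mmUpperB upper else []) ++ [Char.ofNat (d + 65).toNat])

-- ===== PRECONDITION & SPEC =====
-- Pre_ excludes exactly num <= 0, where A raises (NameError: undefined error()).
def Pre_mm_encode (num : Int) : Prop := 0 < num
instance (num : Int) : Decidable (Pre_mm_encode num) := by unfold Pre_mm_encode; infer_instance
def pvWitness_mm_encode : Int := (21)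

def Spec_mm_encode (num : Int) (out : String) : Prop := out = mm_encode_alt num
instance (num : Int) (out : String) : Decidable (Spec_mm_encode num out) := by unfold Spec_mm_encode; infer_instance

-- ===== CLAIM =====
def Claim_equal_mm_encode : Prop := ∀ (num : Int), Dom_mm_encode num → Pre_mm_encode num → Spec_mm_encode num (mm_encode num)

-- ===== LEMMAS AND PROOFS =====
theorem mmLoopA_reverse (upper : Int) (digits : List Char) :
    (mmLoopA upper digits).reverse
      = (if 0 < upper then mmUpperB upper else []) ++ digits.reverse := by
  induction upper, digits using mmLoopA.induct with
  | case1 u digits h ih =>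
    have hb : mmUpperB u
        = (if 0 < PySem.Int.floordiv (u - 1) 5 then mmUpperB (PySem.Int.floordiv (u - 1) 5) else [])
          ++ [Char.ofNat ((PySem.Int.mod (u - 1) 5) + 85).toNat] := by
      rw [mmUpperB]; split <;> simp
    rw [mmLoopA, dif_pos h, ih, if_pos h, hb]
    simp
  | case2 u digits h =>
    rw [mmLoopA, dif_neg h, if_neg h, List.nil_append]

theorem mm_encode_spec : Claim_equal_mm_encode := by
  intro num _ hpre
  unfold Spec_mm_encode mm_encode mm_encode_alt
  have hn : ¬ num ≤ 0 := by exact not_le.mpr hpre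
  rw [if_neg hn, if_neg hn]
  exact congrArg String.mk (by simpa using mmLoopA_reverse _ _)
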